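-- pv_equiv track=rewrite | github.com/liangminghan0228/OmniTransfer | code/cluster/omnicluster/feature_selection.py | get_index_equal_cycle_above_thred
-- ===== SOURCE A (Python) =====
-- def get_index_equal_cycle_above_thred(index_cycle, th):
--     index_freq = {}
--     index_list = []
--     for i, j in index_cycle:
--         if j > 0:
--             if i in index_freq:
--                 index_freq[i] += 1
--             else:
--                 index_freq[i] = 1
--     for i, j in index_freq.items():
--         if j > th:
--             index_list.append(i)
--     index_list.sort()
--     return index_list
-- ===== SOURCE B (Python) =====
-- def get_index_equal_cycle_above_thred(index_cycle, th):
--     # sort the kept indices once, then one run-length scan; no dict, no final sort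
--     idxs = sorted(i for i, j in index_cycle if j > 0)
--     if not idxs:
--         return []
--     result = []
--     prev = idxs[0]
--     run = 1
--     for x in idxs[1:]:
--         if x == prev:
--             run += 1
--         else:
--             if run > th:
--                 result.append(prev)
--             prev = x
--             run = 1
--     if run > th:
--         result.append(prev)
--     return result
-- ===== Notes on version B (the rewrite author's own statement) =====
-- stated objective: alternative
-- what changed: Replaces the hash-map frequency count plus final sort with sort-first-then-one-run-length-scan over the kept indices: the result is emitted already in ascending order, so no dict and no final sort exist in B.
import Mathlib
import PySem

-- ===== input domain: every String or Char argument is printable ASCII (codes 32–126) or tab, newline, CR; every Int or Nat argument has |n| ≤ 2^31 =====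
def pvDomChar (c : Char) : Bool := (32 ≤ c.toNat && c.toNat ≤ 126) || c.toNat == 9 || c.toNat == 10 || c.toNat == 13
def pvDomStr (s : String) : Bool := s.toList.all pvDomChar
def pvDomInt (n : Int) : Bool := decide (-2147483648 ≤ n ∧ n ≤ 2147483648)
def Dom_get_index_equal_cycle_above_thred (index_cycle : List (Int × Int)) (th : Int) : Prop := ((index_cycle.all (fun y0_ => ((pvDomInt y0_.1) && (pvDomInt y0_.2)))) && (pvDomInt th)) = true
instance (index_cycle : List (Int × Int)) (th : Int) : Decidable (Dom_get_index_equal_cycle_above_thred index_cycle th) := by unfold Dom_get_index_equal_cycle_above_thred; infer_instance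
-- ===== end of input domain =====

-- B replaces A's dict-frequency-count-then-sort with sort-the-kept-indices-first plus a single
-- run-length scan that emits the answer already in ascending order (alternative decomposition, same result).


-- ===== PORT A =====
def get_index_equal_cycle_above_thred (index_cycle : List (Int × Int)) (th : Int) : List Int :=
  let index_freq : PySem.Dict Int Int :=
    index_cycle.foldl (fun d p =>
      if p.2 > 0 then
        if d.contains p.1 then d.insert p.1 (d.getD p.1 0 + 1)
        else d.insert p.1 1
      else d) PySem.Dict.empty
  let index_list :=
    index_freq.items.foldl (fun acc p => if p.2 > th then acc ++ [p.1] else acc) []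
  PySem.List.sorted index_list (fun x => x)

-- ===== PORT B =====
-- the run-length scan over the already-sorted index list (Source B's for-loop plus final flush)
def pvRunScan (th : Int) : List Int → Int → Int → List Int → List Int
  | [], prev, run, acc => if run > th then acc ++ [prev] else acc
  | x :: rest, prev, run, acc =>
      if x = prev then pvRunScan th rest prev (run + 1) acc
      else pvRunScan th rest x 1 (if run > th then acc ++ [prev] else acc)

def get_index_equal_cycle_above_thred_alt (index_cycle : List (Int × Int)) (th : Int) : List Int :=
  let idxs := PySem.List.sorted ((index_cycle.filter (fun p => p.2 > 0)).map (fun p => p.1)) (fun x => x)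
  match idxs with
  | [] => []
  | x :: rest => pvRunScan th rest x 1 []

-- ===== PRECONDITION & SPEC =====
def Spec_get_index_equal_cycle_above_thred (index_cycle : List (Int × Int)) (th : Int) (out : List Int) : Prop := out = get_index_equal_cycle_above_thred_alt index_cycle th
instance (index_cycle : List (Int × Int)) (th : Int) (out : List Int) : Decidable (Spec_get_index_equal_cycle_above_thred index_cycle th out) := by unfold Spec_get_index_equal_cycle_above_thred; infer_instance

-- ===== CLAIM (what is proved, stated in full; the proofs are below) =====
def Claim_equal_get_index_equal_cycle_above_thred : Prop := ∀ (index_cycle : List (Int × Int)) (th : Int), Dom_get_index_equal_cycle_above_thred index_cycle th → Spec_get_index_equal_cycle_above_thred index_cycle th (get_index_equal_cycle_above_thred index_cycle th)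

-- ===== LEMMAS AND PROOFS =====
lemma pvFoldlAdd_sublist (l : List Int) : ∀ (acc : List Int),
    ∃ u, List.foldl PySem.Set.add acc l = acc ++ u ∧ u.Sublist l := by
  induction l with
  | nil => intro acc; exact ⟨[], by simp⟩
  | cons x t ih =>
    intro acc
    by_cases h : x ∈ acc
    · obtain ⟨u, hu, hs⟩ := ih acc
      exact ⟨u, by simpa [PySem.Set.add, PySem.Set.contains, h] using hu, hs.cons _⟩
    · obtain ⟨u, hu, hs⟩ := ih (acc ++ [x])
      refine ⟨x :: u, ?_, hs.cons₂ _⟩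
      simpa [PySem.Set.add, PySem.Set.contains, h] using hu

lemma pvFoldlAdd_cons_out (l : List Int) : ∀ (acc : List Int) (p : Int), p ∉ l →
    List.foldl PySem.Set.add (p :: acc) l = p :: List.foldl PySem.Set.add acc l := by
  induction l with
  | nil => intro acc p _; rfl
  | cons x t ih =>
    intro acc p hp
    have hxp : x ≠ p := fun h => hp (by simp [h])
    have hpt : p ∉ t := fun h => hp (by simp [h])
    by_cases h : x ∈ acc
    · simp only [List.foldl_cons, PySem.Set.add, PySem.Set.contains]
      simp [h, hxp]
      exact ih acc p hpt
    · simp only [List.foldl_cons, PySem.Set.add, PySem.Set.contains]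
      simp [h, hxp]
      exact ih (acc ++ [x]) p hpt

lemma pvOfList_replicate_fill (n : Nat) (p : Int) (hn : 0 < n) :
    List.foldl PySem.Set.add ([] : List Int) (List.replicate n p) = [p] := by
  have key : ∀ (k : Nat), List.foldl PySem.Set.add ([p] : List Int) (List.replicate k p) = [p] := by
    intro k
    induction k with
    | zero => rfl
    | succ m ihm => rw [List.replicate_succ, List.foldl_cons]
                    simpa [PySem.Set.add, PySem.Set.contains] using ihm
  obtain ⟨m, rfl⟩ := Nat.exists_eq_succ_of_ne_zero hn.ne'
  rw [List.replicate_succ, List.foldl_cons]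
  simpa [PySem.Set.add, PySem.Set.contains] using key m

lemma pvOfList_replicate_append (n : Nat) (p : Int) (l : List Int)
    (hn : 0 < n) (hp : p ∉ l) :
    PySem.Set.ofList (List.replicate n p ++ l) = p :: PySem.Set.ofList l := by
  rw [PySem.Set.ofList_eq_foldl, PySem.Set.ofList_eq_foldl, List.foldl_append,
    pvOfList_replicate_fill n p hn]
  exact pvFoldlAdd_cons_out l [] p hp

lemma pvRunScan_eq (th : Int) (rest : List Int) : ∀ (prev run : Int) (acc : List Int),
    0 < run → List.Pairwise (· ≤ ·) (prev :: rest) →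
    pvRunScan th rest prev run acc
      = acc ++ (PySem.Set.ofList (List.replicate run.toNat prev ++ rest)).filter
          (fun k => decide (th < ((List.replicate run.toNat prev ++ rest).count k : Int))) := by
  induction rest with
  | nil =>
    intro prev run acc hr _
    have h1 : PySem.Set.ofList (List.replicate run.toNat prev ++ []) = [prev] := by
      simpa using pvOfList_replicate_append run.toNat prev [] (by omega) (by simp)
    rw [h1]
    have hc : ((List.replicate run.toNat prev ++ []).count prev : Int) = run := by
      simp; omega
    simp only [pvRunScan, List.filter, hc]
    by_cases h : th < run
    · simp [h, gt_iff_lt]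
    · simp [h, gt_iff_lt]
  | cons x t ih =>
    intro prev run acc hr hp
    by_cases hx : x = prev
    · subst hx
      have hlist : List.replicate run.toNat x ++ x :: t
          = List.replicate (run + 1).toNat x ++ t := by
        rw [show (run + 1).toNat = run.toNat + 1 by omega, List.replicate_succ',
          List.append_assoc, List.singleton_append]
      have hp' : List.Pairwise (· ≤ ·) (x :: t) :=
        hp.sublist (List.cons_sublist_cons.mpr (List.sublist_cons_self x t))
      rw [show pvRunScan th (x :: t) x run acc = pvRunScan th t x (run + 1) acc by
        simp [pvRunScan]]
      rw [ih x (run + 1) acc (by omega) hp', hlist]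
    · have hprev_le : ∀ y ∈ x :: t, prev ≤ y := by
        intro y hy; exact (List.pairwise_cons.mp hp).1 y hy
      have hxt_pair : List.Pairwise (· ≤ ·) (x :: t) := (List.pairwise_cons.mp hp).2
      have hpnot : prev ∉ x :: t := by
        intro hmem
        rcases List.mem_cons.mp hmem with h | h
        · exact hx h.symm
        · have h1 : prev ≤ x := hprev_le x (by simp)
          have h2 : x ≤ prev := by
            have := (List.pairwise_cons.mp hxt_pair).1 prev h
            exact this
          exact hx (le_antisymm h2 h1)
      rw [show pvRunScan th (x :: t) prev run acc
          = pvRunScan th t x 1 (if run > th then acc ++ [prev] else acc) by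
        simp [pvRunScan, hx]]
      rw [ih x 1 _ (by omega) hxt_pair]
      have hof : PySem.Set.ofList (List.replicate run.toNat prev ++ x :: t)
          = prev :: PySem.Set.ofList (x :: t) :=
        pvOfList_replicate_append run.toNat prev (x :: t) (by omega) hpnot
      rw [hof]
      have hone : (List.replicate (1 : Int).toNat x ++ t) = x :: t := by simp
      rw [hone]
      have hcprev : ((List.replicate run.toNat prev ++ x :: t).count prev : Int) = run := by
        rw [List.count_append, List.count_replicate]
        simp [List.count_eq_zero.mpr hpnot]; omega
      have hfilt : (PySem.Set.ofList (x :: t)).filter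
            (fun k => decide (th < ((List.replicate run.toNat prev ++ x :: t).count k : Int)))
          = (PySem.Set.ofList (x :: t)).filter
            (fun k => decide (th < (((x :: t).count k : Int)))) := by
        apply List.filter_congr
        intro k hk
        have hkmem : k ∈ x :: t := (PySem.Set.mem_ofList _ _).mp hk
        have hkp : (prev == k) = false := by
          simp only [beq_eq_false_iff_ne, ne_eq]
          intro h; exact hpnot (h ▸ hkmem)
        rw [List.count_append, List.count_replicate, hkp]
        simp
      rw [List.filter_cons]
      simp only [hcprev, hfilt]
      by_cases hth : th < run
      · simp [hth, gt_iff_lt]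
      · simp [hth, gt_iff_lt]

-- B computes the kept distinct indices of the sorted list, filtered by multiplicity
lemma pvAlt_eq (ic : List (Int × Int)) (th : Int) :
    get_index_equal_cycle_above_thred_alt ic th
      = (PySem.Set.ofList (PySem.List.sorted ((ic.filter (fun p => p.2 > 0)).map (fun p => p.1)) (fun x => x))).filter
          (fun k => decide (th < ((PySem.List.sorted ((ic.filter (fun p => p.2 > 0)).map (fun p => p.1)) (fun x => x)).count k : Int))) := by
  unfold get_index_equal_cycle_above_thred_alt
  cases hs : PySem.List.sorted ((ic.filter (fun p => p.2 > 0)).map (fun p => p.1)) (fun x => x) with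
  | nil => simp
  | cons x rest =>
    simp only []
    have hpair : List.Pairwise (· ≤ ·) (x :: rest) := by
      have := PySem.List.sorted_pairwise ((ic.filter (fun p => p.2 > 0)).map (fun p => p.1)) (fun x => x)
      rw [hs] at this
      exact this
    have := pvRunScan_eq th rest x 1 [] (by omega) hpair
    simpa using this

lemma pvMain : ∀ (ic : List (Int × Int)) (th : Int),
    get_index_equal_cycle_above_thred ic th = get_index_equal_cycle_above_thred_alt ic th := by
  intro ic th
  unfold get_index_equal_cycle_above_thred
  simp only []
  set L : List Int := (ic.filter (fun p => p.2 > 0)).map (fun p => p.1) with hL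
  set s : List Int := PySem.List.sorted L (fun x => x) with hs
  -- the dict loop is Counter(L)
  have hdict : ic.foldl (fun d p =>
      if p.2 > 0 then
        if d.contains p.1 then d.insert p.1 (d.getD p.1 0 + 1)
        else d.insert p.1 1
      else d) PySem.Dict.empty = PySem.Dict.counter L := by
    rw [PySem.List.foldl_ite_eq_foldl_filter (p := fun p : Int × Int => p.2 > 0)]
    rw [PySem.List.foldl_congr_mem _ _ (fun d p => d.insert p.1 (d.getD p.1 0 + 1)) _ ?_]
    · rw [hL, ← PySem.Dict.foldl_insert_getD_add_one_eq_counter]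
      rw [List.foldl_map]
    · intro d p _
      by_cases h : d.contains p.1
      · simp [h]
      · have hf : d.contains p.1 = false := by simpa using h
        simp [hf, PySem.Dict.getD_of_not_contains d 0 hf]
  rw [hdict]
  -- the append loop is a filter+map over Counter items
  rw [PySem.List.foldl_append_ite (p := fun p : Int × Int => p.2 > th) (f := fun p : Int × Int => p.1)]
  rw [PySem.Dict.items_counter, List.filter_map]
  simp only [List.nil_append, List.map_map, Function.comp_def, gt_iff_lt, List.map_id']
  rw [pvAlt_eq]
  have hperm1 : s.Perm L := PySem.List.sorted_perm L (fun x => x) false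
  have hBfilt : (PySem.Set.ofList s).filter (fun k => decide (th < (s.count k : Int)))
      = (PySem.Set.ofList s).filter (fun k => decide (th < (L.count k : Int))) := by
    apply List.filter_congr
    intro k _
    rw [hperm1.count_eq k]
  have hsetperm : (PySem.Set.ofList s).Perm (PySem.Set.ofList L) := by
    rw [List.perm_ext_iff_of_nodup (PySem.Set.nodup_ofList s) (PySem.Set.nodup_ofList L)]
    intro a
    rw [PySem.Set.mem_ofList, PySem.Set.mem_ofList]
    exact hperm1.mem_iff
  have hpairB : ((PySem.Set.ofList s).filter (fun k => decide (th < (L.count k : Int)))).Pairwise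
      (fun a b => a < b) := by
    apply List.Pairwise.filter
    obtain ⟨u, hu, hsub⟩ := pvFoldlAdd_sublist s []
    have hofl : PySem.Set.ofList s = u := by rw [PySem.Set.ofList_eq_foldl, hu]; simp
    have hle : (PySem.Set.ofList s).Pairwise (· ≤ ·) := by
      rw [hofl]
      have hps : List.Pairwise (· ≤ ·) s := by
        rw [hs]; exact PySem.List.sorted_pairwise L (fun x => x)
      exact hps.sublist hsub
    have hnd : (PySem.Set.ofList s).Nodup := PySem.Set.nodup_ofList s
    exact (hle.and hnd).imp (fun {a b} h => lt_of_le_of_ne h.1 h.2)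
  rw [hBfilt]
  exact PySem.List.sorted_eq_of_perm_of_pairwise_lt _ _ _
    (hsetperm.filter _) hpairB

-- ===== VERDICT (by name: the statement is the Claim_ definition above) =====
theorem get_index_equal_cycle_above_thred_spec : Claim_equal_get_index_equal_cycle_above_thred := by
  intro index_cycle th _
  unfold Spec_get_index_equal_cycle_above_thred
  exact pvMain index_cycle th
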